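-- pv_equiv track=rewrite | github.com/zapier/jsonmask | jsonmask/parsing.py | tokenize_partial_response
-- ===== SOURCE A (Python) =====
-- TERMINALS = ['(', ')', ',', '/']
--
-- def maybe_add_word(name, tokens):
--     if name:
--         tokens.append(name)
--         name = ''
--     return name, tokens
--
-- def tokenize_partial_response(text):
--     tokens = []
--     name = ''
--
--     if not text:
--         return tokens
--
--     for ch in text:
--         if ch in TERMINALS:
--             name, tokens = maybe_add_word(name, tokens)
--             tokens.append(ch)
--
--         else:
--             name += ch
--
--     name, tokens = maybe_add_word(name, tokens)
--     return tokens
-- ===== SOURCE B (Python) =====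
-- def tokenize_partial_response(text):
--     if not text:
--         return []
--     tokens = []
--     rest = text
--     while rest:
--         if rest[0] in '()/,':
--             tokens.append(rest[0])
--             rest = rest[1:]
--         else:
--             k = 1
--             while k < len(rest) and rest[k] not in '()/,':
--                 k += 1
--             tokens.append(rest[:k])
--             rest = rest[k:]
--     return tokens
-- ===== Notes on version B (the rewrite author's own statement) =====
-- stated objective: alternative
-- what changed: Replaces the per-character accumulator with a maybe_add_word flush helper by a maximal-run scanner that slices off one terminal character or one whole word per step, so no pending-name state or flush ever exists.
import Mathlib
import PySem

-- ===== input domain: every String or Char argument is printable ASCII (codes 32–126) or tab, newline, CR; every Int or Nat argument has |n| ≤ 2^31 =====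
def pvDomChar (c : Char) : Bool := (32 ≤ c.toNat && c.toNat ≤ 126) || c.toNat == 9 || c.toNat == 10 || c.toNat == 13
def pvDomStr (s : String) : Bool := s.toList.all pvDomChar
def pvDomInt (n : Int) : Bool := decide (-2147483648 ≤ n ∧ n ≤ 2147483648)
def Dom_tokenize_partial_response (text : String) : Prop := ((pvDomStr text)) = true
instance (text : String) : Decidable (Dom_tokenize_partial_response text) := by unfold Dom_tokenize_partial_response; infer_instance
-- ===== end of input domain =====

-- B replaces A's per-character accumulator + flush helper by a maximal-run scanner
-- (one terminal character or one whole word sliced off per step); alternative, not faster.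

-- ===== PORT A =====
-- `name` (a Python str built by +=) is carried as its List Char; `if name:` is `name ≠ []`.
def maybe_add_word (name : List Char) (tokens : List String) : List Char × List String :=
  if name ≠ [] then ([], tokens ++ [String.ofList name]) else (name, tokens)

-- the body of A's `for ch in text` loop
def stepA (st : List Char × List String) (ch : Char) : List Char × List String :=
  if ['(', ')', ',', '/'].contains ch then
    let p := maybe_add_word st.1 st.2
    (p.1, p.2 ++ [String.ofList [ch]])
  else
    (st.1 ++ [ch], st.2)

def tokenize_partial_response (text : String) : List String :=
  if text = "" then []          -- `if not text: return tokens`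
  else
    let st := text.toList.foldl stepA ([], [])
    (maybe_add_word st.1 st.2).2

-- ===== PORT B =====
def isTerm (c : Char) : Bool := c = '(' || c = ')' || c = ',' || c = '/'   -- `ch in '()/,'`

-- Source B's outer while loop; the inner `while k` finds the end of the current word,
-- i.e. the takeWhile/dropWhile split of the remaining characters (k starts at 1,
-- so the head char is always part of the word).
def altLoop (tokens : List String) (rest : List Char) : List String :=
  match rest with
  | [] => tokens
  | c :: cs =>
    if isTerm c then
      altLoop (tokens ++ [String.ofList [c]]) cs
    else
      altLoop (tokens ++ [String.ofList (c :: cs.takeWhile (fun x => !isTerm x))])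
              (cs.dropWhile (fun x => !isTerm x))
termination_by rest.length
decreasing_by
  · simp
  · simp only [List.length_cons]
    exact Nat.lt_succ_of_le (List.length_dropWhile_le _ _)

def tokenize_partial_response_alt (text : String) : List String :=
  if text = "" then [] else altLoop [] text.toList

-- ===== PRECONDITION & SPEC =====
def Spec_tokenize_partial_response (text : String) (out : List String) : Prop := out = tokenize_partial_response_alt text
instance (text : String) (out : List String) : Decidable (Spec_tokenize_partial_response text out) := by unfold Spec_tokenize_partial_response; infer_instance

-- ===== CLAIM (what is proved, stated in full; the proofs are below) =====
def Claim_equal_tokenize_partial_response : Prop := ∀ (text : String), Dom_tokenize_partial_response text → Spec_tokenize_partial_response text (tokenize_partial_response text)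

-- ===== LEMMAS AND PROOFS =====

lemma contains_eq_isTerm (c : Char) : (['(', ')', ',', '/'].contains c) = isTerm c := by
  simp only [List.contains_cons, List.contains_nil, isTerm, Bool.or_false,
    Bool.beq_eq_decide_eq, Bool.or_assoc]

-- A's loop, restructured as a structural recursion over the remaining characters
-- (pending name generalized, token accumulator dropped).
def Wref : List Char → List Char → List String
  | name, [] => if name ≠ [] then [String.ofList name] else []
  | name, c :: cs =>
    if isTerm c then
      (if name ≠ [] then [String.ofList name] else []) ++ String.ofList [c] :: Wref [] cs
    else
      Wref (name ++ [c]) cs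

-- B's loop with the accumulator dropped.
def Tref (rest : List Char) : List String :=
  match rest with
  | [] => []
  | c :: cs =>
    if isTerm c then String.ofList [c] :: Tref cs
    else String.ofList (c :: cs.takeWhile (fun x => !isTerm x)) :: Tref (cs.dropWhile (fun x => !isTerm x))
termination_by rest.length
decreasing_by
  · simp
  · simp only [List.length_cons]
    exact Nat.lt_succ_of_le (List.length_dropWhile_le _ _)

lemma Tref_nil : Tref [] = [] := by rw [Tref.eq_def]

lemma Tref_cons_term {c : Char} {cs : List Char} (h : isTerm c = true) :
    Tref (c :: cs) = String.ofList [c] :: Tref cs := by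
  rw [Tref.eq_def]; simp [h]

lemma Tref_cons_word {c : Char} {cs : List Char} (h : isTerm c = false) :
    Tref (c :: cs) =
      String.ofList (c :: cs.takeWhile (fun x => !isTerm x)) ::
        Tref (cs.dropWhile (fun x => !isTerm x)) := by
  rw [Tref.eq_def]; simp [h]

lemma foldl_eq_Wref (rest name : List Char) (tokens : List String) :
    (maybe_add_word (rest.foldl stepA (name, tokens)).1 (rest.foldl stepA (name, tokens)).2).2
      = tokens ++ Wref name rest := by
  induction rest generalizing name tokens with
  | nil => by_cases h : name = [] <;> simp [Wref, maybe_add_word, h]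
  | cons c cs ih =>
    rw [List.foldl_cons]
    by_cases hc : isTerm c
    · by_cases h : name = []
      · have hs : stepA (name, tokens) c = ([], tokens ++ [String.ofList [c]]) := by
          unfold stepA
          rw [contains_eq_isTerm, hc]
          simp [maybe_add_word, h]
        rw [hs, ih]
        simp [Wref, hc, h]
      · have hs : stepA (name, tokens) c =
            ([], (tokens ++ [String.ofList name]) ++ [String.ofList [c]]) := by
          unfold stepA
          rw [contains_eq_isTerm, hc]
          simp [maybe_add_word, h]
        rw [hs, ih]
        simp [Wref, hc, h]
    · have hc' : isTerm c = false := by simpa using hc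
      have hs : stepA (name, tokens) c = (name ++ [c], tokens) := by
        unfold stepA
        rw [contains_eq_isTerm, hc']
        simp
      rw [hs, ih]
      simp [Wref, hc']

lemma altLoop_nil (tokens : List String) : altLoop tokens [] = tokens := by
  rw [altLoop.eq_def]

lemma altLoop_term {c : Char} (h : isTerm c = true) (cs : List Char) (tokens : List String) :
    altLoop tokens (c :: cs) = altLoop (tokens ++ [String.ofList [c]]) cs := by
  rw [altLoop.eq_def]; simp [h]

lemma altLoop_word {c : Char} (h : isTerm c = false) (cs : List Char) (tokens : List String) :
    altLoop tokens (c :: cs) =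
      altLoop (tokens ++ [String.ofList (c :: cs.takeWhile (fun x => !isTerm x))])
              (cs.dropWhile (fun x => !isTerm x)) := by
  rw [altLoop.eq_def]; simp [h]

lemma altLoop_eq_Tref (rest : List Char) (tokens : List String) :
    altLoop tokens rest = tokens ++ Tref rest := by
  induction rest using Tref.induct generalizing tokens with
  | case1 => rw [altLoop_nil, Tref_nil, List.append_nil]
  | case2 c cs h ih =>
    rw [altLoop_term h, Tref_cons_term h, ih, List.append_assoc]
    rfl
  | case3 c cs h ih =>
    have h' : isTerm c = false := by simpa using h
    rw [altLoop_word h', Tref_cons_word h', ih, List.append_assoc]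
    rfl

-- The main bridge: A's restructured loop equals B's, both for an empty pending name
-- and for a nonempty one (which is then merged into the first word run).
lemma Wref_eq_Tref (rest : List Char) :
    Wref [] rest = Tref rest ∧
    (∀ name, name ≠ [] →
      Wref name rest =
        String.ofList (name ++ rest.takeWhile (fun x => !isTerm x)) ::
          Tref (rest.dropWhile (fun x => !isTerm x))) := by
  induction rest with
  | nil => simp [Wref, Tref_nil]
  | cons c cs ih =>
    by_cases hc : isTerm c
    · have htw : List.takeWhile (fun x => !isTerm x) (c :: cs) = [] := by
        simp [hc]
      have hdw : List.dropWhile (fun x => !isTerm x) (c :: cs) = c :: cs := by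
        simp [hc]
      constructor
      · rw [Tref_cons_term hc]
        simp [Wref, hc, ih.1]
      · intro name hn
        rw [htw, hdw, Tref_cons_term hc, List.append_nil]
        simp [Wref, hc, hn, ih.1]
    · have hc' : isTerm c = false := by simpa using hc
      have htw : List.takeWhile (fun x => !isTerm x) (c :: cs) =
          c :: List.takeWhile (fun x => !isTerm x) cs := by
        simp [hc']
      have hdw : List.dropWhile (fun x => !isTerm x) (c :: cs) =
          List.dropWhile (fun x => !isTerm x) cs := by
        simp [hc']
      constructor
      · rw [Tref_cons_word hc']
        have := ih.2 [c] (by simp)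
        simpa [Wref, hc'] using this
      · intro name hn
        have h2 := ih.2 (name ++ [c]) (by simp)
        rw [htw, hdw]
        simp only [Wref, hc', Bool.false_eq_true, if_false, h2, List.append_assoc,
          List.cons_append, List.nil_append]

-- ===== VERDICT (by name: the statement is the Claim_ definition above) =====
theorem tokenize_partial_response_spec : Claim_equal_tokenize_partial_response := by
  intro text _
  unfold Spec_tokenize_partial_response tokenize_partial_response tokenize_partial_response_alt
  by_cases h : text = ""
  · simp [h]
  · simp only [h, if_false]
    rw [foldl_eq_Wref, altLoop_eq_Tref, (Wref_eq_Tref text.toList).1]
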